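-- pv_equiv track=rewrite | github.com/geonjunk/self-study | PS/백준 단계별 문제풀기/브루트포스 및 구현/1074 Z.py | search
-- ===== SOURCE A (Python) =====
-- def search(r, c, n):
--     if n == 0:
--         return 0
--     if 0 <= r < pow(2, n-1) and 0 <= c < pow(2, n-1):
--         return search(r, c, n-1)
--     elif 0 <= r < pow(2, n-1) and c >= pow(2, n-1):
--         return pow(2, n-1)*pow(2, n-1)+search(r, c-pow(2, n-1), n-1)
--     elif r >= pow(2, n-1) and 0 <= c < pow(2, n-1):
--         return pow(2, n-1)*pow(2, n-1)*2+search(r-pow(2, n-1), c, n-1)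
--     else:
--         return pow(2, n-1)*pow(2, n-1)*3+search(r-pow(2, n-1), c-pow(2, n-1), n-1)
-- ===== SOURCE B (Python) =====
-- def search(r, c, n):
--     result = 0
--     for i in range(n - 1, -1, -1):
--         half = 2 ** i
--         if 0 <= r < half and 0 <= c < half:
--             q = 0
--         elif 0 <= r < half and c >= half:
--             q = 1
--             c -= half
--         elif r >= half and 0 <= c < half:
--             q = 2
--             r -= half
--         else:
--             q = 3
--             r -= half
--             c -= half
--         result += q * half * half
--     return result
-- ===== Notes on version B (the rewrite author's own statement) =====
-- stated objective: alternative
-- what changed: Replaced A's recursion (each level returning quadrant-offset plus recursive call) by an iterative top-down loop over bit levels with an explicit (result, r, c) accumulator.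
import Mathlib
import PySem

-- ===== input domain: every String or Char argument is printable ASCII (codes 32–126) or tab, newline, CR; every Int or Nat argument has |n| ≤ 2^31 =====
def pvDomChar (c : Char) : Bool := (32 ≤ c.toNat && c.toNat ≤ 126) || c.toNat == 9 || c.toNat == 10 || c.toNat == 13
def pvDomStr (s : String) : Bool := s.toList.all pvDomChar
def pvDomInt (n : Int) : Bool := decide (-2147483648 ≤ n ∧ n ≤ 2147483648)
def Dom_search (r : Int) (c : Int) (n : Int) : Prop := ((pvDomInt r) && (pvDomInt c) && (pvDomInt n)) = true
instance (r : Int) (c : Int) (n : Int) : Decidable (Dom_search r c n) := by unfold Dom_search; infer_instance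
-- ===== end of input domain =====

-- B replaces A's quadrant recursion with an iterative loop over bit levels carrying an
-- explicit (result, r, c) accumulator; same cost, different decomposition.

-- ===== PORT A =====
-- A recurses on n; for n ≥ 0 this is structural recursion on n.toNat (the fuel below),
-- for n < 0 Python never terminates (RecursionError) — those inputs are outside Pre_search.
def searchGo (r : Int) (c : Int) : Nat → Int
  | 0 => 0
  | Nat.succ m =>
    if 0 ≤ r ∧ r < 2 ^ m ∧ 0 ≤ c ∧ c < 2 ^ m then
      searchGo r c m
    else if 0 ≤ r ∧ r < 2 ^ m ∧ (2:Int) ^ m ≤ c then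
      (2:Int) ^ m * 2 ^ m + searchGo r (c - 2 ^ m) m
    else if (2:Int) ^ m ≤ r ∧ 0 ≤ c ∧ c < 2 ^ m then
      (2:Int) ^ m * 2 ^ m * 2 + searchGo (r - 2 ^ m) c m
    else
      (2:Int) ^ m * 2 ^ m * 3 + searchGo (r - 2 ^ m) (c - 2 ^ m) m

def search (r : Int) (c : Int) (n : Int) : Int := searchGo r c n.toNat

-- ===== PORT B =====
-- one loop iteration of Source B: state is (result, r, c), i the current level
def searchStep (st : Int × Int × Int) (i : Nat) : Int × Int × Int :=
  let (result, r, c) := st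
  let half : Int := 2 ^ i
  if 0 ≤ r ∧ r < half ∧ 0 ≤ c ∧ c < half then
    (result + 0 * half * half, r, c)
  else if 0 ≤ r ∧ r < half ∧ half ≤ c then
    (result + 1 * half * half, r, c - half)
  else if half ≤ r ∧ 0 ≤ c ∧ c < half then
    (result + 2 * half * half, r - half, c)
  else
    (result + 3 * half * half, r - half, c - half)

-- range(n-1, -1, -1) is the reversed List.range n.toNat
def search_alt (r : Int) (c : Int) (n : Int) : Int :=
  (((List.range n.toNat).reverse).foldl searchStep (0, r, c)).1

-- ===== PRECONDITION & SPEC =====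
-- Pre_ excludes n < 0, where A's recursion never reaches its base case (Python RecursionError).
def Pre_search (r : Int) (c : Int) (n : Int) : Prop := 0 ≤ n
instance (r : Int) (c : Int) (n : Int) : Decidable (Pre_search r c n) := by
  unfold Pre_search; infer_instance

def pvWitness_search : Int × Int × Int := (3, 2, 3)

def Spec_search (r : Int) (c : Int) (n : Int) (out : Int) : Prop := out = search_alt r c n
instance (r : Int) (c : Int) (n : Int) (out : Int) : Decidable (Spec_search r c n out) := by
  unfold Spec_search; infer_instance

-- ===== CLAIM (what is proved, stated in full; the proofs are below) =====
def Claim_equal_search : Prop :=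
  ∀ (r : Int) (c : Int) (n : Int), Dom_search r c n → Pre_search r c n →
    Spec_search r c n (search r c n)

-- ===== LEMMAS AND PROOFS =====

-- the loop with fuel m, started at accumulator a, adds exactly A's recursive value
theorem foldl_searchStep (m : Nat) :
    ∀ (a r c : Int),
      (((List.range m).reverse).foldl searchStep (a, r, c)).1 = a + searchGo r c m := by
  induction m with
  | zero => intro a r c; simp [searchGo]
  | succ m ih =>
    intro a r c
    rw [List.range_succ, List.reverse_append]
    simp only [List.reverse_singleton, List.singleton_append, List.foldl_cons]
    unfold searchGo
    by_cases h1 : 0 ≤ r ∧ r < 2 ^ m ∧ 0 ≤ c ∧ c < (2:Int) ^ m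
    · have hs : searchStep (a, r, c) m = (a + 0 * 2 ^ m * 2 ^ m, r, c) := by
        simp only [searchStep]; rw [if_pos h1]
      rw [hs, ih, if_pos h1]; ring
    · by_cases h2 : 0 ≤ r ∧ r < 2 ^ m ∧ (2:Int) ^ m ≤ c
      · have hs : searchStep (a, r, c) m = (a + 1 * 2 ^ m * 2 ^ m, r, c - 2 ^ m) := by
          simp only [searchStep]; rw [if_neg h1, if_pos h2]
        rw [hs, ih, if_neg h1, if_pos h2]; ring
      · by_cases h3 : (2:Int) ^ m ≤ r ∧ 0 ≤ c ∧ c < 2 ^ m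
        · have hs : searchStep (a, r, c) m = (a + 2 * 2 ^ m * 2 ^ m, r - 2 ^ m, c) := by
            simp only [searchStep]; rw [if_neg h1, if_neg h2, if_pos h3]
          rw [hs, ih, if_neg h1, if_neg h2, if_pos h3]; ring
        · have hs : searchStep (a, r, c) m = (a + 3 * 2 ^ m * 2 ^ m, r - 2 ^ m, c - 2 ^ m) := by
            simp only [searchStep]; rw [if_neg h1, if_neg h2, if_neg h3]
          rw [hs, ih, if_neg h1, if_neg h2, if_neg h3]; ring

-- ===== VERDICT (by name: the statement is the Claim_ definition above) =====
theorem search_spec : Claim_equal_search := by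
  intro r c n _ _
  unfold Spec_search search search_alt
  rw [foldl_searchStep]
  ring
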